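-- pv_equiv track=rewrite | github.com/Dikabraxis/Pathdog | pathdog/report.py | _relation_chips
-- ===== SOURCE A (Python) =====
-- def _escape(s: str) -> str:
--     return (s.replace("&", "&amp;").replace("<", "&lt;")
--              .replace(">", "&gt;").replace('"', "&quot;"))
--
-- def _relation_chips(entries: list[dict]) -> str:
--     counts: dict[str, int] = {}
--     for e in entries:
--         rel = e.get("relation", "?")
--         counts[rel] = counts.get(rel, 0) + 1
--     chips = "".join(
--         f'<span class="relation-chip"><span>{_escape(rel)}</span><b>{count}</b></span>'
--         for rel, count in sorted(counts.items(), key=lambda item: (-item[1], item[0]))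
--     )
--     return f'<div class="relation-chips">{chips}</div>' if chips else ""
-- ===== SOURCE B (Python) =====
-- def _escape(s: str) -> str:
--     return (s.replace("&", "&amp;").replace("<", "&lt;")
--              .replace(">", "&gt;").replace('"', "&quot;"))
--
-- def _relation_chips(entries: list[dict]) -> str:
--     rels = sorted(e.get("relation", "?") for e in entries)
--     pairs = []
--     i = 0
--     n = len(rels)
--     while i < n:
--         j = i + 1
--         while j < n and rels[j] == rels[i]:
--             j += 1
--         pairs.append((rels[i], j - i))
--         i = j
--     pairs.sort(key=lambda p: (-p[1], p[0]))
--     chips = "".join(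
--         f'<span class="relation-chip"><span>{_escape(r)}</span><b>{c}</b></span>'
--         for r, c in pairs
--     )
--     return f'<div class="relation-chips">{chips}</div>' if chips else ""
-- ===== Notes on version B (the rewrite author's own statement) =====
-- stated objective: alternative
-- what changed: Replaces A's hash-dict frequency accumulation with sort-first counting: the relation strings are sorted, equal values are counted as adjacent runs by a two-pointer scan, and the run pairs are re-sorted by (-count, relation); no dict and no per-key counting lookup remain.
import Mathlib
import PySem

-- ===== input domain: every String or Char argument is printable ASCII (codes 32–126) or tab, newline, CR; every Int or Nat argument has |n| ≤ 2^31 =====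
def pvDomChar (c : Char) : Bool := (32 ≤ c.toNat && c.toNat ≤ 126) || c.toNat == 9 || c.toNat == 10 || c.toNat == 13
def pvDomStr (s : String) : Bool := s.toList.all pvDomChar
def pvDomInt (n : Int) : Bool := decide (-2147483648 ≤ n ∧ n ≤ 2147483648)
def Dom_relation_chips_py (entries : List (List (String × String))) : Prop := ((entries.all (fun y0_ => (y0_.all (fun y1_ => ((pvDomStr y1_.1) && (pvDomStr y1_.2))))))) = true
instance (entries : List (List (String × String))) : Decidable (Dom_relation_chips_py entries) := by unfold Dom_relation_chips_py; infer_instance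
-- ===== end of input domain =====

-- B replaces A's hash-dict accumulation by sort-first counting: sort the relation strings,
-- count equal values as adjacent runs with a two-pointer scan, then re-sort the run pairs by
-- (-count, relation); objective: alternative (same result, no speed claim).

-- _escape, the module helper both Pythons call
def pvEscape (s : String) : String :=
  PySem.Str.replace (PySem.Str.replace (PySem.Str.replace (PySem.Str.replace s "&" "&amp;") "<" "&lt;") ">" "&gt;") "\"" "&quot;"

-- ===== PORT A =====
def relation_chips_py (entries : List (List (String × String))) : String :=
  let counts : PySem.Dict String Int :=
    entries.foldl (fun d e =>
      let rel := (PySem.Dict.ofList e).getD "relation" "?"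
      d.insert rel (d.getD rel 0 + 1)) PySem.Dict.empty
  let chips := String.join
    ((PySem.List.sorted2 counts.items (fun p => -p.2) (fun p => p.1)).map
      (fun p => "<span class=\"relation-chip\"><span>" ++ pvEscape p.1 ++ "</span><b>" ++ PySem.Int.toStr p.2 ++ "</b></span>"))
  if chips ≠ "" then "<div class=\"relation-chips\">" ++ chips ++ "</div>" else ""

-- ===== PORT B =====
-- the inner while loop of Source B: collect the run of elements equal to the head, then recurse on the rest
def pvRuns : List String → List (String × Int)
  | [] => []
  | x :: t =>
    let same := t.takeWhile (fun y => y == x)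
    let rest := t.dropWhile (fun y => y == x)
    (x, (1 + same.length : Int)) :: pvRuns rest
termination_by xs => xs.length
decreasing_by
  simpa using Nat.lt_succ_of_le (List.length_dropWhile_le _ t)

def relation_chips_py_alt (entries : List (List (String × String))) : String :=
  let rels := PySem.List.sorted (entries.map (fun e => (PySem.Dict.ofList e).getD "relation" "?")) (fun x => x)
  let pairs := pvRuns rels
  let pairs2 := PySem.List.sorted2 pairs (fun p => -p.2) (fun p => p.1)
  let chips := String.join
    (pairs2.map
      (fun p => "<span class=\"relation-chip\"><span>" ++ pvEscape p.1 ++ "</span><b>" ++ PySem.Int.toStr p.2 ++ "</b></span>"))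
  if chips ≠ "" then "<div class=\"relation-chips\">" ++ chips ++ "</div>" else ""

-- ===== PRECONDITION & SPEC =====
def Spec_relation_chips_py (entries : List (List (String × String))) (out : String) : Prop := out = relation_chips_py_alt entries
instance (entries : List (List (String × String))) (out : String) : Decidable (Spec_relation_chips_py entries out) := by unfold Spec_relation_chips_py; infer_instance

-- ===== CLAIM (what is proved, stated in full; the proofs are below) =====
def Claim_equal_relation_chips_py : Prop := ∀ (entries : List (List (String × String))), Dom_relation_chips_py entries → Spec_relation_chips_py entries (relation_chips_py entries)

-- ===== LEMMAS AND PROOFS =====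

-- the combined (-count, relation) sort key, lexicographically, as a single injective key
def pvLexKey (p : String × Int) : Lex (Int × String) := toLex (-p.2, p.1)

lemma pvLexKey_inj : Function.Injective pvLexKey := by
  intro a b h
  have h' : ((-a.2 : Int), a.1) = ((-b.2 : Int), b.1) := congrArg ofLex h
  have h1 := congrArg Prod.fst h'
  have h2 := congrArg Prod.snd h'
  simp at h1 h2
  exact Prod.ext h2 h1

lemma pvBefore_eq (a b : String × Int) :
    (decide ((fun p : String × Int => -p.2) a < (fun p : String × Int => -p.2) b) ||
      (!decide ((fun p : String × Int => -p.2) b < (fun p : String × Int => -p.2) a) &&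
        decide ((fun p : String × Int => p.1) a < (fun p : String × Int => p.1) b)))
    = decide (pvLexKey a < pvLexKey b) := by
  simp only [pvLexKey, Prod.Lex.toLex_lt_toLex]
  by_cases h1 : (-a.2 : Int) < -b.2
  · simp [h1]
  · by_cases h2 : (-b.2 : Int) < -a.2
    · have : ¬ ((-a.2 : Int) = -b.2) := by omega
      simp [h1, h2, this]
    · have he : (-a.2 : Int) = -b.2 := by omega
      simp [he]

lemma pvSorted2_eq_foldl (xs : List (String × Int)) :
    PySem.List.sorted2 xs (fun p => -p.2) (fun p => p.1) false
    = xs.foldl (fun acc x => PySem.List.insertBy (fun a b => decide (pvLexKey a < pvLexKey b)) x acc) [] := by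
  show xs.foldl _ [] = _
  congr 1
  funext acc x
  congr 1
  funext a b
  exact pvBefore_eq a b

lemma pvFoldl_pairwise (xs : List (String × Int)) (acc : List (String × Int))
    (h : acc.Pairwise (fun a b => pvLexKey a ≤ pvLexKey b)) :
    (xs.foldl (fun acc x => PySem.List.insertBy (fun a b => decide (pvLexKey a < pvLexKey b)) x acc) acc).Pairwise
      (fun a b => pvLexKey a ≤ pvLexKey b) := by
  induction xs generalizing acc with
  | nil => exact h
  | cons x t ih => exact ih _ (PySem.List.insertBy_pairwise_le pvLexKey x acc h)

lemma pvSorted2_pairwise (xs : List (String × Int)) :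
    (PySem.List.sorted2 xs (fun p => -p.2) (fun p => p.1) false).Pairwise (fun a b => pvLexKey a ≤ pvLexKey b) := by
  rw [pvSorted2_eq_foldl]
  exact pvFoldl_pairwise xs [] (List.Pairwise.nil)

lemma pvSorted2_eq_of_perm (xs ys : List (String × Int)) (hp : xs.Perm ys) :
    PySem.List.sorted2 xs (fun p => -p.2) (fun p => p.1) false
    = PySem.List.sorted2 ys (fun p => -p.2) (fun p => p.1) false := by
  refine PySem.List.eq_of_perm_of_pairwise_le_of_injective pvLexKey pvLexKey_inj ?_
    (pvSorted2_pairwise xs) (pvSorted2_pairwise ys)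
  exact ((PySem.List.sorted2_perm xs _ _ false).trans hp).trans (PySem.List.sorted2_perm ys _ _ false).symm


-- x is not in the dropWhile remainder of a sorted tail
lemma pvNotMem_rest (x : String) (t : List String) (ht : t.Pairwise (· ≤ ·))
    (hx : ∀ y ∈ t, x ≤ y) : x ∉ t.dropWhile (fun y => y == x) := by
  intro hmem
  set rest := t.dropWhile (fun y => y == x) with hr
  have hne : rest ≠ [] := List.ne_nil_of_mem hmem
  have hhead : ((rest.head hne) == x) = false := List.head_dropWhile_not _ hne
  have hheadne : rest.head hne ≠ x := by simpa using hhead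
  have hsub : rest.Sublist t := List.dropWhile_sublist _
  have hrp : rest.Pairwise (· ≤ ·) := ht.sublist hsub
  have hx_le : x ≤ rest.head hne := hx _ (hsub.subset (List.head_mem hne))
  have hct : rest.head hne :: rest.tail = rest := List.cons_head_tail hne
  rw [← hct] at hmem hrp
  rcases List.mem_cons.mp hmem with h1 | h1
  · exact hheadne h1.symm
  · exact hheadne (le_antisymm ((List.pairwise_cons.mp hrp).1 x h1) hx_le)

lemma pvFilter_ofList_same (x : String) (same rest : List String)
    (hs : ∀ y ∈ same, y = x) :
    (PySem.Set.ofList (same ++ rest)).filter (fun y => !(y == x))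
    = (PySem.Set.ofList rest).filter (fun y => !(y == x)) := by
  induction same with
  | nil => rfl
  | cons y ys ih =>
    have hy : y = x := hs y (by simp)
    have ihs : ∀ z ∈ ys, z = x := fun z hz => hs z (by simp [hz])
    rw [List.cons_append, PySem.Set.ofList_cons]
    have hdis : PySem.Set.discard (PySem.Set.ofList (ys ++ rest)) y
        = (PySem.Set.ofList (ys ++ rest)).filter (fun z => !(z == y)) := rfl
    rw [hdis, hy]
    simp only [List.filter_cons, List.filter_filter]
    simp [ih ihs]

lemma pvRuns_sorted_char_n (n : Nat) : ∀ xs : List String, xs.length ≤ n → xs.Pairwise (· ≤ ·) →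
    pvRuns xs = (PySem.Set.ofList xs).map (fun k => (k, (xs.count k : Int))) := by
  induction n with
  | zero =>
    intro xs hl _
    have hx : xs = [] := List.eq_nil_of_length_eq_zero (Nat.le_zero.mp hl)
    subst hx; simp [pvRuns]
  | succ n ih =>
    intro xs hl hp
    match xs with
    | [] => simp [pvRuns]
    | x :: t =>
      have hx : ∀ y ∈ t, x ≤ y := (List.pairwise_cons.mp hp).1
      have ht : t.Pairwise (· ≤ ·) := (List.pairwise_cons.mp hp).2
      set same := t.takeWhile (fun y => y == x) with hsameeq
      set rest := t.dropWhile (fun y => y == x) with hresteq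
      have hsplit : same ++ rest = t := List.takeWhile_append_dropWhile
      have hsame : ∀ y ∈ same, y = x := by
        intro y hy
        have := List.mem_takeWhile_imp (hsameeq ▸ hy)
        simpa using this
      have hxrest : x ∉ rest := pvNotMem_rest x t ht hx
      have hrestp : rest.Pairwise (· ≤ ·) := ht.sublist (List.dropWhile_sublist _)
      have hrestlen : rest.length ≤ n := by
        rw [hresteq]
        have h1 := List.length_dropWhile_le (fun y => y == x) t
        have h2 : t.length ≤ n := by simpa using Nat.le_of_succ_le_succ hl
        omega
      have hih := ih rest hrestlen hrestp
      -- unfold one step of pvRuns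
      rw [pvRuns]
      simp only [← hsameeq, ← hresteq]
      -- key-set equation
      have hkeys : PySem.Set.ofList (x :: t) = x :: (PySem.Set.ofList rest) := by
        rw [PySem.Set.ofList_cons]
        have hdis : PySem.Set.discard (PySem.Set.ofList t) x
            = (PySem.Set.ofList t).filter (fun y => !(y == x)) := rfl
        rw [hdis, ← hsplit, pvFilter_ofList_same x same rest hsame]
        rw [List.filter_eq_self.mpr]
        intro y hy
        have : y ∈ rest := (PySem.Set.mem_ofList _ _).mp hy
        simp only [Bool.not_eq_eq_eq_not, Bool.not_true, beq_eq_false_iff_ne, ne_eq]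
        intro he; exact hxrest (he ▸ this)
      rw [hkeys, List.map_cons, hih]
      congr 1
      · -- head pair
        have hcx : (x :: t).count x = 1 + same.length := by
          rw [List.count_cons_self, ← hsplit, List.count_append]
          have h1 : same.count x = same.length := by
            rw [List.count_eq_length]
            intro b hb; exact (hsame b hb).symm
          have h2 : rest.count x = 0 := List.count_eq_zero.mpr hxrest
          omega
        refine Prod.ext rfl ?_
        simp only [hcx]
        push_cast
        ring
      · -- tail: the counts in (x::t) restrict to counts in rest
        apply List.map_congr_left
        intro k hk
        have hkrest : k ∈ rest := (PySem.Set.mem_ofList _ _).mp hk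
        have hkx : k ≠ x := fun he => hxrest (he ▸ hkrest)
        have hck : (x :: t).count k = rest.count k := by
          have hstep : List.count k (x :: t) = List.count k t := by simp [Ne.symm hkx]
          rw [hstep, ← hsplit, List.count_append]
          have : same.count k = 0 := List.count_eq_zero.mpr (fun hm => hkx (hsame k hm))
          omega
        simp [hck]

theorem relation_chips_py_spec_aux (entries : List (List (String × String))) :
    relation_chips_py entries = relation_chips_py_alt entries := by
  unfold relation_chips_py relation_chips_py_alt
  have hc : entries.foldl (fun d e =>
      let rel := (PySem.Dict.ofList e).getD "relation" "?"
      d.insert rel (d.getD rel 0 + 1)) PySem.Dict.empty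
      = PySem.Dict.counter (entries.map (fun e => (PySem.Dict.ofList e).getD "relation" "?")) := by
    rw [← PySem.Dict.foldl_insert_getD_add_one_eq_counter, List.foldl_map]
  simp only [hc, PySem.Dict.items_counter]
  set rels := entries.map (fun e => (PySem.Dict.ofList e).getD "relation" "?") with hrels
  set srels := PySem.List.sorted rels (fun x => x) with hsr
  have hperm_s : srels.Perm rels := PySem.List.sorted_perm rels _ false
  have hsorted : srels.Pairwise (· ≤ ·) := by
    simpa using PySem.List.sorted_pairwise rels (fun x => x)
  have hruns : pvRuns srels = (PySem.Set.ofList srels).map (fun k => (k, (srels.count k : Int))) :=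
    pvRuns_sorted_char_n srels.length srels le_rfl hsorted
  have hmapcongr : (PySem.Set.ofList srels).map (fun k => (k, (srels.count k : Int)))
      = (PySem.Set.ofList srels).map (fun k => (k, (rels.count k : Int))) := by
    apply List.map_congr_left
    intro k _
    rw [hperm_s.count_eq k]
  have hsetperm : (PySem.Set.ofList rels).Perm (PySem.Set.ofList srels) := by
    rw [List.perm_ext_iff_of_nodup (PySem.Set.nodup_ofList _) (PySem.Set.nodup_ofList _)]
    intro a
    rw [PySem.Set.mem_ofList, PySem.Set.mem_ofList]
    exact ⟨fun h => hperm_s.mem_iff.mpr h, fun h => hperm_s.mem_iff.mp h⟩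
  have hpairperm : ((PySem.Set.ofList rels).map (fun k => (k, (rels.count k : Int)))).Perm (pvRuns srels) := by
    rw [hruns, hmapcongr]
    exact hsetperm.map _
  rw [pvSorted2_eq_of_perm _ _ hpairperm]

-- ===== VERDICT (by name: the statement is the Claim_ definition above) =====
theorem relation_chips_py_spec : Claim_equal_relation_chips_py := by
  intro entries _
  exact relation_chips_py_spec_aux entries
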